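-- pv_equiv track=rewrite | github.com/graditone/graditone | scripts/generate_scales.py | build_spelling_table
-- ===== SOURCE A (Python) =====
-- _DEFAULT_SPELLING: list[tuple[str, int]] = [
--     ("C",  0),  # 0
--     ("C",  1),  # 1  C#
--     ("D",  0),  # 2
--     ("D",  1),  # 3  D#
--     ("E",  0),  # 4
--     ("F",  0),  # 5
--     ("F",  1),  # 6  F#
--     ("G",  0),  # 7
--     ("G",  1),  # 8  G#
--     ("A",  0),  # 9
--     ("A",  1),  # 10 A#
--     ("B",  0),  # 11
-- ]
--
-- _SHARP_ORDER = [5, 0, 7, 2, 9, 4, 11]  # F C G D A E B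
--
-- _FLAT_ORDER  = [11, 4, 9, 2, 7, 0, 5]  # B E A D G C F
--
-- _PC_TO_STEP = {0: "C", 2: "D", 4: "E", 5: "F", 7: "G", 9: "A", 11: "B"}
--
-- def build_spelling_table(fifths: int) -> list[tuple[str, int]]:
--     """Build a 12-element spelling lookup for a given key signature.
--
--     For sharp keys, re-spells colliding pitch classes with the correct
--     diatonic step (e.g. pc 5 → E# in F# major instead of F natural).
--     For flat keys, re-spells chromatic pitch classes as flats
--     (e.g. pc 10 → Bb instead of A#).
--     """
--     table = list(_DEFAULT_SPELLING)
--     if fifths > 0: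
--         for i in range(min(fifths, 7)):
--             diatonic_pc = _SHARP_ORDER[i]
--             sounding_pc = (diatonic_pc + 1) % 12
--             table[sounding_pc] = (_PC_TO_STEP[diatonic_pc], 1)
--     elif fifths < 0:
--         for i in range(min(abs(fifths), 7)):
--             diatonic_pc = _FLAT_ORDER[i]
--             sounding_pc = (diatonic_pc + 11) % 12
--             table[sounding_pc] = (_PC_TO_STEP[diatonic_pc], -1)
--     return table
-- ===== SOURCE B (Python) =====
-- def build_spelling_table(fifths: int) -> list[tuple[str, int]]:
--     """Build a 12-element spelling lookup for a given key signature.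
--
--     Closed-form circle-of-fifths arithmetic: no order lists, no default
--     table.  A diatonic pitch class d sits at position (7*(d-5)) % 12 in
--     the sharp order and (5*(d-11)) % 12 in the flat order, its letter is
--     "CDEFGAB"[(7*d+6)//12], and d is diatonic iff (7*d+6) % 12 >= 5.
--     Each of the 12 slots is computed independently from these formulas.
--     """
--     sharps = min(fifths, 7) if fifths > 0 else 0
--     flats = min(-fifths, 7) if fifths < 0 else 0
--
--     def letter(d: int) -> str:
--         return "CDEFGAB"[(7 * d + 6) // 12]
--
--     def diatonic(d: int) -> bool:
--         return (7 * d + 6) % 12 >= 5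
--
--     def spell(pc: int) -> tuple[str, int]:
--         d = (pc - 1) % 12
--         if diatonic(d) and (7 * (d - 5)) % 12 < sharps:
--             return (letter(d), 1)
--         d = (pc + 1) % 12
--         if diatonic(d) and (5 * (d - 11)) % 12 < flats:
--             return (letter(d), -1)
--         if diatonic(pc):
--             return (letter(pc), 0)
--         return (letter(pc - 1), 1)
--
--     return [spell(pc) for pc in range(12)]
-- ===== Notes on version B (the rewrite author's own statement) =====
-- stated objective: alternative
-- what changed: B discards all of A's lookup tables (default spelling list, sharp/flat order lists, pc-to-step dict) and the copy-then-mutate loop, computing each of the 12 slots independently from closed-form circle-of-fifths arithmetic: a diatonic pc d has sharp-order position (7*(d-5))%12, flat-order position (5*(d-11))%12, letter "CDEFGAB"[(7*d+6)//12], and is diatonic iff (7*d+6)%12>=5.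
import Mathlib
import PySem

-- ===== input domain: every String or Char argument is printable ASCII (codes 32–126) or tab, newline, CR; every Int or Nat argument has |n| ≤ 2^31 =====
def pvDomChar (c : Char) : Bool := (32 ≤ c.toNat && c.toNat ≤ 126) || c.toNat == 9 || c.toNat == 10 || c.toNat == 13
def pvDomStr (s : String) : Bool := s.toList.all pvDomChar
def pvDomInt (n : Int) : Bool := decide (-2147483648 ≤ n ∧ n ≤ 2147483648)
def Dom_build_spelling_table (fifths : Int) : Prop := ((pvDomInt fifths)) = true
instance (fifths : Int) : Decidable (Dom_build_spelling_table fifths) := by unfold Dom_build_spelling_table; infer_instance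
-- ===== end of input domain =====

-- B replaces A's table lookups and copy-then-mutate loop with closed-form circle-of-fifths arithmetic per slot (alternative decomposition, same values).

-- ===== PORT A =====
def pvDefaultSpelling : List (String × Int) :=
  [("C", 0), ("C", 1), ("D", 0), ("D", 1), ("E", 0), ("F", 0),
   ("F", 1), ("G", 0), ("G", 1), ("A", 0), ("A", 1), ("B", 0)]

def pvSharpOrder : List Int := [5, 0, 7, 2, 9, 4, 11]

def pvFlatOrder : List Int := [11, 4, 9, 2, 7, 0, 5]

def pvPcToStep : PySem.Dict Int String :=
  PySem.Dict.ofList [(0, "C"), (2, "D"), (4, "E"), (5, "F"), (7, "G"), (9, "A"), (11, "B")]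

def build_spelling_table (fifths : Int) : List (String × Int) :=
  if fifths > 0 then
    (PySem.List.pyRange 0 (min fifths 7) 1).foldl (fun table i =>
      let d := PySem.List.pyGetD pvSharpOrder i (0 : Int)
      let s := PySem.Int.mod (d + 1) 12
      PySem.List.pySetD table s (pvPcToStep.getD d "", (1 : Int))) pvDefaultSpelling
  else if fifths < 0 then
    (PySem.List.pyRange 0 (min |fifths| 7) 1).foldl (fun table i =>
      let d := PySem.List.pyGetD pvFlatOrder i (0 : Int)
      let s := PySem.Int.mod (d + 11) 12
      PySem.List.pySetD table s (pvPcToStep.getD d "", (-1 : Int))) pvDefaultSpelling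
  else pvDefaultSpelling

-- ===== PORT B =====
-- "CDEFGAB"[idx]: the index is always in 0..6 where B calls it, so the none branch is unreachable.
def pvLetter (d : Int) : String :=
  match PySem.Str.pyGet? "CDEFGAB" (PySem.Int.floordiv (7 * d + 6) 12) with
  | some c => String.ofList [c]
  | none => ""

def pvDiatonic (d : Int) : Bool := decide (5 ≤ PySem.Int.mod (7 * d + 6) 12)

def pvSpell (sharps flats : Int) (pc : Int) : String × Int :=
  let d1 := PySem.Int.mod (pc - 1) 12
  if pvDiatonic d1 ∧ PySem.Int.mod (7 * (d1 - 5)) 12 < sharps then (pvLetter d1, 1)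
  else
    let d2 := PySem.Int.mod (pc + 1) 12
    if pvDiatonic d2 ∧ PySem.Int.mod (5 * (d2 - 11)) 12 < flats then (pvLetter d2, -1)
    else if pvDiatonic pc then (pvLetter pc, 0)
    else (pvLetter (pc - 1), 1)

def build_spelling_table_alt (fifths : Int) : List (String × Int) :=
  let sharps := if fifths > 0 then min fifths 7 else 0
  let flats := if fifths < 0 then min (-fifths) 7 else 0
  (PySem.List.pyRange 0 12 1).map (pvSpell sharps flats)

-- ===== PRECONDITION & SPEC =====
def Spec_build_spelling_table (fifths : Int) (out : List (String × Int)) : Prop := out = build_spelling_table_alt fifths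
instance (fifths : Int) (out : List (String × Int)) : Decidable (Spec_build_spelling_table fifths out) := by unfold Spec_build_spelling_table; infer_instance

-- ===== CLAIM (what is proved, stated in full; the proofs are below) =====
def Claim_equal_build_spelling_table : Prop := ∀ (fifths : Int), Dom_build_spelling_table fifths → Spec_build_spelling_table fifths (build_spelling_table fifths)

-- ===== LEMMAS AND PROOFS =====

-- Both sides depend on fifths only through min fifths 7 (sharp case): 7 concrete cases.
theorem pv_sharp_case (fifths : Int) (h : fifths > 0) :
    build_spelling_table fifths = build_spelling_table_alt fifths := by
  have hne : ¬ fifths < 0 := by omega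
  have h1 : (1 : Int) ≤ min fifths 7 := by omega
  have h2 : min fifths 7 ≤ 7 := by omega
  simp only [build_spelling_table, build_spelling_table_alt, if_pos h, if_neg hne]
  generalize hg : min fifths 7 = m at h1 h2 ⊢
  interval_cases m <;> decide

theorem pv_flat_case (fifths : Int) (h : fifths < 0) :
    build_spelling_table fifths = build_spelling_table_alt fifths := by
  have hne : ¬ fifths > 0 := by omega
  have habs : |fifths| = -fifths := abs_of_neg h
  have h1 : (1 : Int) ≤ min (-fifths) 7 := by omega
  have h2 : min (-fifths) 7 ≤ 7 := by omega
  simp only [build_spelling_table, build_spelling_table_alt, if_neg hne, if_pos h, habs]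
  generalize hg : min (-fifths) 7 = m at h1 h2 ⊢
  interval_cases m <;> decide

-- ===== VERDICT (by name: the statement is the Claim_ definition above) =====
theorem build_spelling_table_spec : Claim_equal_build_spelling_table := by
  intro fifths _
  unfold Spec_build_spelling_table
  rcases lt_trichotomy fifths 0 with h | h | h
  · exact pv_flat_case fifths h
  · subst h; decide
  · exact pv_sharp_case fifths h
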